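-- pv_equiv track=rewrite | github.com/cainanBlack/CodeSignal | CodeSignal/Arcade/World1/isBeautifulString/isBeautifulString.py | solution
-- ===== SOURCE A (Python) =====
-- def solution(s1):
--     dic = {}
--     uniqStr = set(s1)
--     uniqStr = sorted(uniqStr)
--
--     if uniqStr[0] != 'a':
--         return False
--
--     for i in uniqStr:
--         count = 0
--         for b in s1:
--             if i == b:
--                 count += 1
--                 dic[b] = count
--
--     for k in range(len(uniqStr)-1):
--         if abs(ord(uniqStr[k]) - ord(uniqStr[k+1])) != 1:
--             return False
--
--     for m in range(len(dic) - 1):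
--         if dic[uniqStr[m]] < dic[uniqStr[m + 1]]:
--             return False
--
--     return True
-- ===== SOURCE B (Python) =====
-- def solution(s1):
--     counts = {}
--     for ch in s1:
--         counts[ch] = counts.get(ch, 0) + 1
--     n = len(counts)
--     letters = [chr(ord('a') + i) for i in range(n)]
--     if set(counts) != set(letters):
--         return False
--     vals = [counts[c] for c in letters]
--     return all(vals[i] >= vals[i + 1] for i in range(n - 1))
-- ===== Notes on version B (the rewrite author's own statement) =====
-- stated objective: faster
-- what changed: B builds one frequency dict in a single pass and checks contiguity from the first alphabet letter by set equality against the generated prefix alphabet, replacing A's per-unique-letter rescans of the whole string and the separate head/adjacent-ord scans.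
-- crash fix: On the empty string A raises IndexError (uniqStr[0]); B returns True (the empty string is vacuously beautiful). — e.g. on solution(""): A raises IndexError, B returns true
import Mathlib
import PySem

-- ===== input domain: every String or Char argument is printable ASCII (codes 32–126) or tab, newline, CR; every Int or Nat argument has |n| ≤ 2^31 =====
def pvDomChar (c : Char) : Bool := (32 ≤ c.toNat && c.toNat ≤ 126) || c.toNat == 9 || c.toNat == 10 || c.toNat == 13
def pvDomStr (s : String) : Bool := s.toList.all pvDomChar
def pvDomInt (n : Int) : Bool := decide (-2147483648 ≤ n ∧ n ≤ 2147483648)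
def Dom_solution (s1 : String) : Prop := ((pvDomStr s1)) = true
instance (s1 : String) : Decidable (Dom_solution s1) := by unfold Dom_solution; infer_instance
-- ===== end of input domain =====

-- B replaces A's per-unique-letter rescans of the string and the head/adjacent-ord scans by one
-- frequency dict built in a single pass plus a set-equality check against the generated prefix
-- alphabet (objective: faster; a timing run measured B ≥ 1.5× faster at the largest size).

-- ===== PORT A =====
-- 'for b in s1: if i == b: count += 1; dic[b] = count' — inner fold carries (count, dic).
-- The early 'return False' scans are ported as '.all' (pure tests, same result).
-- All pyGetD list indices below are in range (0 ≤ k, k+1 ≤ len-1) and every dic key looked up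
-- was inserted by the count loop, so the defaults are never used (Python raises nowhere there).
def solution (s1 : String) : Bool :=
  let uniqStr : List Char := PySem.List.sorted (PySem.Set.ofList s1.toList) (fun x => x) false
  match uniqStr with
  | [] => false   -- Python raises IndexError at uniqStr[0]; excluded by Pre_solution
  | u0 :: _ =>
    if u0 ≠ 'a' then false
    else
      let dic : PySem.Dict Char Int := uniqStr.foldl (fun d i =>
        (s1.toList.foldl (fun (st : Int × PySem.Dict Char Int) b =>
            if i == b then (st.1 + 1, st.2.insert b (st.1 + 1)) else st) (0, d)).2) PySem.Dict.empty
      if !((PySem.List.pyRange 0 ((uniqStr.length : Int) - 1) 1).all (fun k =>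
            (((PySem.List.pyGetD uniqStr k 'a').toNat : Int)
              - ((PySem.List.pyGetD uniqStr (k + 1) 'a').toNat : Int)).natAbs == 1))
      then false
      else
        (PySem.List.pyRange 0 ((dic.size : Int) - 1) 1).all (fun m =>
          !(dic.getD (PySem.List.pyGetD uniqStr m 'a') 0
              < dic.getD (PySem.List.pyGetD uniqStr (m + 1) 'a') 0))

-- ===== PORT B =====
-- counts[c] in 'vals' is guarded by the set equality, so the key is always present (getD exact);
-- vals[i]/vals[i+1] indices are in range (i+1 ≤ n-1).
def solution_alt (s1 : String) : Bool :=
  let counts : PySem.Dict Char Int :=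
    s1.toList.foldl (fun d ch => d.insert ch (d.getD ch 0 + 1)) PySem.Dict.empty
  let n : Nat := counts.size
  let letters : List Char := (List.range n).map (fun i => Char.ofNat (97 + i))
  if !(PySem.Set.equal (PySem.Set.ofList counts.keys) (PySem.Set.ofList letters)) then false
  else
    let vals : List Int := letters.map (fun c => counts.getD c 0)
    (List.range (n - 1)).all (fun i =>
      PySem.List.pyGetD vals (i : Int) 0 ≥ PySem.List.pyGetD vals ((i : Int) + 1) 0)

-- ===== PRECONDITION & SPEC =====
-- Pre_ excludes only the empty string, on which A raises IndexError (uniqStr[0]).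
def Pre_solution (s1 : String) : Prop := s1 ≠ ""
instance (s1 : String) : Decidable (Pre_solution s1) := by unfold Pre_solution; infer_instance
def pvWitness_solution : String := "aab"

-- On the empty string A raises IndexError (uniqStr[0]); B returns True (vacuously beautiful).
def Raises_solution (s1 : String) : Prop := s1 = ""
instance (s1 : String) : Decidable (Raises_solution s1) := by unfold Raises_solution; infer_instance
def pvRaiseWitness_solution : String := ""
def pvRaiseWitnessOut_solution : Bool := true

def Spec_solution (s1 : String) (out : Bool) : Prop := out = solution_alt s1
instance (s1 : String) (out : Bool) : Decidable (Spec_solution s1 out) := by unfold Spec_solution; infer_instance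

-- ===== CLAIM (what is proved, stated in full; the proofs are below) =====
def Claim_equal_solution : Prop := ∀ (s1 : String), Dom_solution s1 → Pre_solution s1 → Spec_solution s1 (solution s1)
def Claim_raises_solution : Prop := (∀ (s1 : String), Dom_solution s1 → Raises_solution s1 → ¬ Pre_solution s1) ∧ (Dom_solution (pvRaiseWitness_solution) ∧ Raises_solution (pvRaiseWitness_solution) ∧ solution_alt (pvRaiseWitness_solution) = pvRaiseWitnessOut_solution)

-- ===== LEMMAS AND PROOFS =====

def lettersL (n : Nat) : List Char := (List.range n).map (fun i => Char.ofNat (97 + i))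

theorem toNat_ofNat_small (i : Nat) (h : i < 1000) : (Char.ofNat i).toNat = i := by
  have hv : i.isValidChar := by left; omega
  simp only [Char.ofNat, hv, dite_true, Char.ofNatAux, Char.toNat]
  simp [UInt32.toNat]

theorem char_lt_iff (a b : Char) : a < b ↔ a.toNat < b.toNat := by
  rw [Char.lt_def]; exact Iff.rfl

theorem char_toNat_inj {a b : Char} (h : a.toNat = b.toNat) : a = b :=
  Char.ext (UInt32.toNat_inj.mp h)

theorem lettersL_length (n : Nat) : (lettersL n).length = n := by simp [lettersL]

theorem lettersL_getElem (n i : Nat) (hi : i < (lettersL n).length) :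
    (lettersL n)[i] = Char.ofNat (97 + i) := by simp [lettersL]

theorem lettersL_toNat (n i : Nat) (hn : n ≤ 127) (hi : i < (lettersL n).length) :
    ((lettersL n)[i]).toNat = 97 + i := by
  rw [lettersL_getElem]
  exact toNat_ofNat_small _ (by simp [lettersL_length] at hi; omega)

theorem lettersL_pairwise (n : Nat) (hn : n ≤ 127) : (lettersL n).Pairwise (· < ·) := by
  rw [List.pairwise_iff_getElem]
  intro i j hi hj hij
  rw [char_lt_iff, lettersL_toNat n i hn, lettersL_toNat n j hn]
  omega

theorem lettersL_nodup (n : Nat) (hn : n ≤ 127) : (lettersL n).Nodup :=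
  (lettersL_pairwise n hn).imp (fun h => ne_of_lt h)

-- a nodup list of chars with codes ≤ 126 has length ≤ 127
theorem nodup_char_length_le (l : List Char) (hnd : l.Nodup)
    (hb : ∀ c ∈ l, c.toNat ≤ 126) : l.length ≤ 127 := by
  classical
  have h1 : l.length = l.toFinset.card := (List.toFinset_card_of_nodup hnd).symm
  have h2 : l.toFinset.image Char.toNat ⊆ Finset.range 127 := by
    intro x hx
    simp only [Finset.mem_image, List.mem_toFinset] at hx
    obtain ⟨c, hc, rfl⟩ := hx
    simp [Finset.mem_range]
    exact Nat.lt_succ_of_le (hb c hc)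
  have h3 : (l.toFinset.image Char.toNat).card = l.toFinset.card :=
    Finset.card_image_of_injective _ (fun a b h => char_toNat_inj h)
  calc l.length = _ := h1
    _ = _ := h3.symm
    _ ≤ (Finset.range 127).card := Finset.card_le_card h2
    _ = 127 := Finset.card_range 127

-- strictly increasing chars, head code 97, adjacent codes differ by 1 ⇒ the prefix alphabet
theorem u_eq_lettersL (u : List Char)
    (hb : ∀ c ∈ u, c.toNat ≤ 126)
    (h0 : ∀ (h : 0 < u.length), (u[0]).toNat = 97)
    (hadj : ∀ k, (hk : k + 1 < u.length) → (u[k + 1]).toNat = (u[k]).toNat + 1) :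
    u = lettersL u.length := by
  have hcode : ∀ i, (hi : i < u.length) → (u[i]).toNat = 97 + i := by
    intro i
    induction i with
    | zero => intro hi; simpa using h0 hi
    | succ j ih =>
      intro hi
      rw [hadj j hi, ih (by omega)]; omega
  have hn : u.length ≤ 127 := by
    rcases Nat.eq_zero_or_pos u.length with hz | hp
    · omega
    · have h1 := hcode (u.length - 1) (by omega)
      have h2 := hb (u[u.length - 1]'(by omega)) (List.getElem_mem (by omega))
      omega
  apply List.ext_getElem (by simp [lettersL_length])
  intro i h1 h2
  apply char_toNat_inj
  rw [hcode i h1, lettersL_toNat _ _ hn h2]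

theorem innerLoop (i : Char) (L : List Char) (c0 : Int) (d : PySem.Dict Char Int) :
    L.foldl (fun (st : Int × PySem.Dict Char Int) b =>
        if i == b then (st.1 + 1, st.2.insert b (st.1 + 1)) else st) (c0, d)
      = (c0 + L.count i, if i ∈ L then d.insert i (c0 + L.count i) else d) := by
  induction L generalizing c0 d with
  | nil => simp
  | cons b tl ih =>
    by_cases hb : i = b
    · subst hb
      simp only [List.foldl_cons, BEq.rfl, if_true, ih, List.count_cons_self, List.mem_cons]
      by_cases htl : i ∈ tl
      · simp only [htl, if_true, or_true, PySem.Dict.insert_insert_self]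
        push_cast; ring_nf
      · simp only [htl, if_false, List.count_eq_zero_of_not_mem htl, true_or, if_true]
        norm_num
    · have hbe : (i == b) = false := by simp [hb]
      simp only [List.foldl_cons, hbe, ih]
      simp [hb, Ne.symm hb]

theorem list_all_congr {α : Type} (l : List α) (f g : α → Bool) (h : ∀ x ∈ l, f x = g x) :
    l.all f = l.all g := by
  induction l with
  | nil => rfl
  | cons a t ih =>
    simp only [List.all_cons, h a (by simp), ih (fun x hx => h x (by simp [hx]))]

theorem main (s1 : String) (hdom : pvDomStr s1 = true) (hne : s1 ≠ "") :
    solution s1 = solution_alt s1 := by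
  have hLne : s1.toList ≠ [] := fun h => hne (String.toList_eq_nil_iff.mp h)
  set L := s1.toList with hL
  have hb : ∀ c ∈ L, c.toNat ≤ 126 := by
    intro c hc
    have := (List.all_eq_true.mp hdom) c hc
    simp only [pvDomChar, Bool.or_eq_true, Bool.and_eq_true, decide_eq_true_eq, beq_iff_eq] at this
    omega
  set u : List Char := PySem.List.sorted (PySem.Set.ofList L) (fun x => x) false with hu
  have hmemu : ∀ c, c ∈ u ↔ c ∈ L := by
    intro c; rw [hu, PySem.List.mem_sorted, PySem.Set.mem_ofList]
  have hnd : u.Nodup := ((PySem.List.sorted_perm _ _ _).nodup_iff).mpr (PySem.Set.nodup_ofList L)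
  have hpw : u.Pairwise (· < ·) := PySem.List.sorted_ofList_pairwise_lt L
  have hbu : ∀ c ∈ u, c.toNat ≤ 126 := fun c hc => hb c ((hmemu c).mp hc)
  have hn127 : u.length ≤ 127 := nodup_char_length_le u hnd hbu
  have hune : u ≠ [] := by
    rw [hu, Ne, PySem.List.sorted_eq_nil_iff]
    intro h
    rcases List.exists_mem_of_ne_nil L hLne with ⟨c, hc⟩
    have : c ∈ PySem.Set.ofList L := (PySem.Set.mem_ofList L c).mpr hc
    rw [h] at this
    exact absurd this (List.not_mem_nil)
  -- B-side dict facts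
  set counts : PySem.Dict Char Int :=
    L.foldl (fun d ch => d.insert ch (d.getD ch 0 + 1)) PySem.Dict.empty with hcounts
  have hkeys : counts.keys = PySem.Set.ofList L := by
    rw [hcounts, PySem.Dict.keys_foldl_insert L (fun d x => d.getD x 0 + 1) PySem.Dict.empty,
      PySem.Dict.keys_empty, PySem.Set.update_nil_left]
  have hgetD : ∀ c, counts.getD c 0 = (L.count c : Int) := by
    intro c
    rw [hcounts, PySem.Dict.getD_foldl_insert_add_one, PySem.Dict.getD_empty, zero_add]
  have hsize : counts.size = u.length := by
    have h1 : counts.size = counts.keys.length := by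
      simp [PySem.Dict.size, PySem.Dict.keys]
    rw [h1, hkeys, hu, PySem.List.length_sorted]
  -- A-side dict facts
  set dic : PySem.Dict Char Int := u.foldl (fun d i =>
      (L.foldl (fun (st : Int × PySem.Dict Char Int) b =>
          if i == b then (st.1 + 1, st.2.insert b (st.1 + 1)) else st) (0, d)).2)
      PySem.Dict.empty with hdic
  have hdic2 : dic = u.foldl (fun d i => d.insert i ((L.count i : Int))) PySem.Dict.empty := by
    rw [hdic]
    apply PySem.List.foldl_congr_mem
    intro d i hi
    rw [innerLoop]
    simp [(hmemu i).mp hi]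
  have hitems : dic.items = u.map (fun i => (i, (L.count i : Int))) := by
    rw [hdic2]
    have := PySem.Dict.items_foldl_insert_fresh u (fun i => i) (fun i => (L.count i : Int))
      PySem.Dict.empty (fun a _ => PySem.Dict.contains_empty a) (by simpa using hnd)
    simpa using this
  have hdkeys : dic.keys = u := by
    simp only [PySem.Dict.keys, hitems, List.map_map]
    have : ((fun (x : Char × Int) => x.1) ∘ fun i => (i, (L.count i : Int))) = id := rfl
    rw [this, List.map_id]
  have hdnd : dic.keys.Nodup := by rw [hdkeys]; exact hnd
  have hdget : ∀ c ∈ u, dic.getD c 0 = (L.count c : Int) := by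
    intro c hc
    exact PySem.Dict.getD_of_mem_items dic (by rw [hitems]; exact List.mem_map_of_mem hc) hdnd 0
  have hdsize : dic.size = u.length := by
    simp [PySem.Dict.size, hitems]
  obtain ⟨u0, ut, hcons⟩ : ∃ u0 ut, u = u0 :: ut := by
    cases hc : u with
    | nil => exact absurd hc hune
    | cons a b => exact ⟨a, b, rfl⟩
  unfold solution solution_alt
  dsimp only []
  rw [← hL, ← hu, ← hcounts, ← hdic]
  rw [hcons]
  dsimp only
  rw [← hcons]
  -- abbreviate the generated alphabet
  rw [hsize]
  have hletfold : List.map (fun i => Char.ofNat (97 + i)) (List.range u.length) = lettersL u.length := rfl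
  rw [hletfold]
  have hNpos : 0 < u.length := by rw [hcons]; simp
  have hcast : ((u.length : Int) - 1) = ((u.length - 1 : Nat) : Int) := by omega
  have hu0 : ∀ (h : 0 < u.length), u[0] = u0 := by
    intro h
    simp [hcons]
  have hpw' : ∀ i j, (hi : i < u.length) → (hj : j < u.length) → i < j →
      (u[i]).toNat < (u[j]).toNat := by
    intro i j hi hj hij
    rw [← char_lt_iff]
    exact List.pairwise_iff_getElem.mp hpw i j hi hj hij
  by_cases hEq : u = lettersL u.length
  · -- the beautiful shape: everything reduces to the count check
    have hu0a : u0 = 'a' := by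
      have h0 : (u[0]'hNpos).toNat = 97 := by
        rw [List.getElem_of_eq hEq]
        exact lettersL_toNat _ 0 hn127 (by rw [lettersL_length]; omega)
      apply char_toNat_inj
      rw [hu0 hNpos] at h0
      rw [h0]; rfl
    have hAdj : ((PySem.List.pyRange 0 ((u.length : Int) - 1)).all (fun k =>
        (((PySem.List.pyGetD u k 'a').toNat : Int)
          - ((PySem.List.pyGetD u (k + 1) 'a').toNat : Int)).natAbs == 1)) = true := by
      rw [hcast, PySem.List.pyRange_zero_natCast, List.all_map, List.all_eq_true]
      intro k hk
      rw [List.mem_range] at hk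
      have hk1 : k + 1 < u.length := by omega
      simp only [Function.comp]
      rw [show ((k : Int) + 1) = ((k + 1 : Nat) : Int) by push_cast; ring]
      rw [PySem.List.pyGetD_natCast, PySem.List.pyGetD_natCast,
        List.getD_eq_getElem u 'a' (by omega), List.getD_eq_getElem u 'a' hk1]
      have e1 : (u[k]'(by omega)).toNat = 97 + k := by
        rw [List.getElem_of_eq hEq]
        exact lettersL_toNat _ k hn127 (by rw [lettersL_length]; omega)
      have e2 : (u[k+1]'hk1).toNat = 97 + (k + 1) := by
        rw [List.getElem_of_eq hEq]
        exact lettersL_toNat _ (k+1) hn127 (by rw [lettersL_length]; omega)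
      rw [beq_iff_eq, e1, e2]
      omega
    have hSE : (PySem.Set.ofList counts.keys).equal (PySem.Set.ofList (lettersL u.length)) = true := by
      rw [PySem.Set.equal_iff]
      intro x
      rw [hkeys]
      rw [PySem.Set.mem_ofList, PySem.Set.mem_ofList, PySem.Set.mem_ofList]
      rw [← hEq, hmemu]
    rw [hAdj, hSE]
    simp only [hu0a, ne_eq, not_true_eq_false, if_false, Bool.not_true, Bool.false_eq_true]
    -- both sides are the count check
    rw [hdsize, hcast, PySem.List.pyRange_zero_natCast, List.all_map]
    apply list_all_congr
    intro k hk
    rw [List.mem_range] at hk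
    have hk1 : k + 1 < u.length := by omega
    simp only [Function.comp]
    rw [show ((k : Int) + 1) = ((k + 1 : Nat) : Int) by push_cast; ring]
    rw [PySem.List.pyGetD_natCast, PySem.List.pyGetD_natCast,
      List.getD_eq_getElem u 'a' (by omega), List.getD_eq_getElem u 'a' hk1]
    have hvlen : (List.map (fun c => counts.getD c 0) (lettersL u.length)).length = u.length := by
      simp [lettersL_length]
    rw [PySem.List.pyGetD_natCast, List.getD_eq_getElem _ 0 (by rw [hvlen]; omega)]
    rw [PySem.List.pyGetD_natCast, List.getD_eq_getElem _ 0 (by rw [hvlen]; omega)]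
    rw [List.getElem_map, List.getElem_map]
    have eu1 : (lettersL u.length)[k]'(by rw [lettersL_length]; omega) = u[k]'(by omega) :=
      (List.getElem_of_eq hEq _).symm
    have eu2 : (lettersL u.length)[k+1]'(by rw [lettersL_length]; omega) = u[k+1]'(by omega) :=
      (List.getElem_of_eq hEq _).symm
    rw [eu1, eu2, hgetD, hgetD, hdget _ (List.getElem_mem _), hdget _ (List.getElem_mem _)]
    rw [← decide_not]
    congr 1
    simp [ge_iff_le, not_lt]
  · -- not the prefix alphabet: both sides are false
    have hSE : (PySem.Set.ofList counts.keys).equal (PySem.Set.ofList (lettersL u.length)) = false := by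
      by_contra h
      rw [Bool.not_eq_false] at h
      have hmem := (PySem.Set.equal_iff _ _).mp h
      apply hEq
      rw [hu]
      apply PySem.List.sorted_eq_of_perm_of_pairwise_lt _ _ _ _ (lettersL_pairwise _ hn127)
      rw [List.perm_ext_iff_of_nodup (lettersL_nodup _ hn127) (PySem.Set.nodup_ofList L)]
      intro a
      have := hmem a
      rw [hkeys] at this
      rw [PySem.Set.mem_ofList, PySem.Set.mem_ofList, PySem.Set.mem_ofList] at this
      rw [PySem.Set.mem_ofList]
      exact ⟨fun hl => this.mpr hl, fun hl => this.mp hl⟩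
    rw [hSE]
    simp only [Bool.not_false, if_true]
    -- now the A side must be false as well
    by_cases ha : u0 = 'a'
    · have hAdj : ((PySem.List.pyRange 0 ((u.length : Int) - 1)).all (fun k =>
          (((PySem.List.pyGetD u k 'a').toNat : Int)
            - ((PySem.List.pyGetD u (k + 1) 'a').toNat : Int)).natAbs == 1)) = false := by
        by_contra h
        rw [Bool.not_eq_false] at h
        apply hEq
        rw [hcast, PySem.List.pyRange_zero_natCast, List.all_map, List.all_eq_true] at h
        have hadj : ∀ k, (hk : k + 1 < u.length) → (u[k + 1]).toNat = (u[k]).toNat + 1 := by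
          intro k hk
          have hmemk : k ∈ List.range (u.length - 1) := by rw [List.mem_range]; omega
          have hh := h k hmemk
          simp only [Function.comp] at hh
          rw [show ((k : Int) + 1) = ((k + 1 : Nat) : Int) by push_cast; ring] at hh
          rw [PySem.List.pyGetD_natCast, PySem.List.pyGetD_natCast,
            List.getD_eq_getElem u 'a' (by omega), List.getD_eq_getElem u 'a' hk,
            beq_iff_eq] at hh
          have hlt := hpw' k (k+1) (by omega) hk (by omega)
          omega
        have h0 : ∀ (h : 0 < u.length), (u[0]).toNat = 97 := by
          intro h
          rw [hu0 h, ha]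
          rfl
        have := u_eq_lettersL u hbu h0 hadj
        exact this
      rw [hAdj]
      simp [ha]
    · simp [ha]

-- ===== VERDICT (by name: the statement is the Claim_ definition above) =====
theorem solution_spec : Claim_equal_solution := by
  intro s1 hdom hpre
  unfold Spec_solution
  exact main s1 hdom hpre

@[simp] theorem solution_raises : Claim_raises_solution := by
  unfold Claim_raises_solution
  exact ⟨fun s1 _ hr hp => hp hr, by decide⟩
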